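-- pv_equiv track=rewrite | github.com/Priyaanshu-Patel/Priyaanshu_syanpse_tasks_C084 | hermionie_lumnos.py | earliest_lumos_step
-- ===== SOURCE A (Python) =====
-- def earliest_lumos_step(runes: str) -> int:
--     needed = {'L', 'U', 'M', 'O', 'S'}
--     seen = set()
--
--     for i, ch in enumerate(runes):
--         c = ch.upper()
--         if c in needed:
--             seen.add(c)
--             if len(seen) == len(needed):
--                 return i + 1
--     return -1
-- ===== SOURCE B (Python) =====
-- def earliest_lumos_step(runes: str) -> int:
--     # Five independent staged scans: find each required letter's first occurrence,
--     # then the answer is the latest of those positions + 1 (or -1 if one is missing).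
--     def first_index(c):
--         for i, ch in enumerate(runes):
--             if ch.upper() == c:
--                 return i
--         return None
--     idxs = [first_index(c) for c in 'LUMOS']
--     if None in idxs:
--         return -1
--     return max(idxs) + 1
-- ===== Notes on version B (the rewrite author's own statement) =====
-- stated objective: alternative
-- what changed: B replaces A's single accumulate-a-set-until-complete scan with early return by five independent staged scans, one per required letter, each locating that letter's first occurrence; the result is the largest of those positions + 1, or -1 if any letter never occurs.
import Mathlib
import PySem

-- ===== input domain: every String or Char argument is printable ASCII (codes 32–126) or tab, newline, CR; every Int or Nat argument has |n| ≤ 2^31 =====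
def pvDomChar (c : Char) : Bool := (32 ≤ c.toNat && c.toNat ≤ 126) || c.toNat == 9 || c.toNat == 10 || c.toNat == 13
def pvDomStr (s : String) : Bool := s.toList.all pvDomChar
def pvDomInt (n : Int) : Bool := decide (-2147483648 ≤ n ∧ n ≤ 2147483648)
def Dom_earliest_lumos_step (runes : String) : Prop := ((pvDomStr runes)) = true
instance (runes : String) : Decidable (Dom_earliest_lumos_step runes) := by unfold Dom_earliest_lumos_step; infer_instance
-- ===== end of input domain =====

-- B finds each required letter's first occurrence by its own scan (five staged scans)
-- and answers max of those positions + 1, or -1; alternative decomposition, same value as A.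

-- ===== PORT A =====
-- needed = {'L', 'U', 'M', 'O', 'S'}
def lumosNeeded : PySem.Set Char := PySem.Set.ofList ['L', 'U', 'M', 'O', 'S']

-- for i, ch in enumerate(runes): accumulate seen; return i+1 once seen is complete
def lumosLoopA : List Char → Int → PySem.Set Char → Int
  | [], _, _ => -1
  | ch :: rest, i, seen =>
    let c := PySem.Chars.upperChar ch
    if PySem.Set.contains lumosNeeded c then
      let seen' := PySem.Set.add seen c
      if PySem.Set.len seen' = PySem.Set.len lumosNeeded then i + 1
      else lumosLoopA rest (i + 1) seen'
    else lumosLoopA rest (i + 1) seen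

def earliest_lumos_step (runes : String) : Int :=
  lumosLoopA runes.toList 0 PySem.Set.empty

-- ===== PORT B =====
-- the letters of 'LUMOS'
def lumosNeededB : List Char := ['L', 'U', 'M', 'O', 'S']

-- def first_index(c): for i, ch in enumerate(runes): if ch.upper() == c: return i; return None
def lumosFirstIdx : List Char → Int → Char → Option Int
  | [], _, _ => none
  | ch :: rest, i, c =>
    if PySem.Chars.upperChar ch = c then some i else lumosFirstIdx rest (i + 1) c

-- idxs = [first_index(c) for c in 'LUMOS']; if None in idxs: -1 else max(idxs)+1
def earliest_lumos_step_alt (runes : String) : Int :=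
  let idxs := lumosNeededB.map (fun c => lumosFirstIdx runes.toList 0 c)
  if idxs.contains none then -1
  else (PySem.List.max? (idxs.filterMap id) (fun x => x)).getD 0 + 1

-- ===== PRECONDITION & SPEC =====
def Spec_earliest_lumos_step (runes : String) (out : Int) : Prop := out = earliest_lumos_step_alt runes
instance (runes : String) (out : Int) : Decidable (Spec_earliest_lumos_step runes out) := by unfold Spec_earliest_lumos_step; infer_instance

-- ===== CLAIM (what is proved, stated in full; the proofs are below) =====
def Claim_equal_earliest_lumos_step : Prop := ∀ (runes : String), Dom_earliest_lumos_step runes → Spec_earliest_lumos_step runes (earliest_lumos_step runes)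

-- ===== LEMMAS AND PROOFS =====

-- B's post-processing, parametrised by the letters still missing (proof-side helper)
def lumosAltCore (missing : List Char) (cs : List Char) (i : Int) : Int :=
  let idxs := missing.map (fun c => lumosFirstIdx cs i c)
  if idxs.contains none then -1
  else (PySem.List.max? (idxs.filterMap id) (fun x => x)).getD 0 + 1

-- max? with key id returns (as a value) exactly the maximum
theorem lumos_max_char (l : List Int) (m : Int) (hm : m ∈ l) (hb : ∀ x ∈ l, x ≤ m) :
    PySem.List.max? l (fun x => x) = some m := by
  cases hx : PySem.List.max? l (fun x => x) with
  | none =>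
    have := (PySem.List.max?_eq_none_iff l (fun x => x)).mp hx
    subst this; simp at hm
  | some m' =>
    have h1 := PySem.List.max?_mem hx
    have h2 := PySem.List.max?_isMax hx m hm
    have h3 := hb m' h1
    have : m' = m := le_antisymm h3 h2
    rw [this]

theorem lumosFirstIdx_ge (cs : List Char) (i : Int) (c : Char) (v : Int)
    (h : lumosFirstIdx cs i c = some v) : i ≤ v := by
  induction cs generalizing i with
  | nil => simp [lumosFirstIdx] at h
  | cons ch rest ih =>
    simp only [lumosFirstIdx] at h
    split at h
    · simp only [Option.some.injEq] at h; omega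
    · have := ih (i + 1) h; omega

theorem lumos_missing_ne_nil (seen : PySem.Set Char) (hlen : seen.length < 5) :
    lumosNeededB.filter (fun d => !(PySem.Set.contains seen d)) ≠ [] := by
  intro h
  have hall : ∀ d ∈ lumosNeededB, d ∈ seen := by
    intro d hd
    have := List.filter_eq_nil_iff.mp h d hd
    simpa [PySem.Set.contains, List.contains_eq_mem] using this
  have hsp := List.subperm_of_subset (by decide : lumosNeededB.Nodup) hall
  have := hsp.length_le
  simp [lumosNeededB] at this
  omega

theorem lumos_eq_singleton (l : List Char) (c : Char) (hnd : l.Nodup)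
    (hall : ∀ x ∈ l, x = c) (hc : c ∈ l) : l = [c] := by
  cases l with
  | nil => simp at hc
  | cons x t =>
    have hx : x = c := hall x (by simp)
    cases t with
    | nil => rw [hx]
    | cons y t' =>
      have hy : y = c := hall y (by simp)
      rw [List.nodup_cons] at hnd
      exact absurd (by simp [hx, hy]) hnd.1

-- if the scanned head's uppercase is not a missing letter, the scan just moves on
theorem lumos_altCore_skip (missing : List Char) (ch : Char) (rest : List Char) (i : Int)
    (h : PySem.Chars.upperChar ch ∉ missing) :
    lumosAltCore missing (ch :: rest) i = lumosAltCore missing rest (i + 1) := by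
  unfold lumosAltCore
  have hmap : missing.map (fun c => lumosFirstIdx (ch :: rest) i c)
      = missing.map (fun c => lumosFirstIdx rest (i + 1) c) := by
    apply List.map_congr_left
    intro d hd
    have : PySem.Chars.upperChar ch ≠ d := fun he => h (he ▸ hd)
    simp [lumosFirstIdx, this]
  rw [hmap]

-- the head's uppercase is one of the missing letters: absorbing its index i preserves the value
theorem lumos_altCore_hit (l1 l2 : List Char) (ch : Char) (rest : List Char) (i : Int)
    (hc1 : PySem.Chars.upperChar ch ∉ l1) (hc2 : PySem.Chars.upperChar ch ∉ l2)
    (hne : l1 ++ l2 ≠ []) :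
    lumosAltCore (l1 ++ PySem.Chars.upperChar ch :: l2) (ch :: rest) i
      = lumosAltCore (l1 ++ l2) rest (i + 1) := by
  unfold lumosAltCore
  have hmap1 : l1.map (fun c => lumosFirstIdx (ch :: rest) i c)
      = l1.map (fun c => lumosFirstIdx rest (i + 1) c) := by
    apply List.map_congr_left
    intro d hd
    have : PySem.Chars.upperChar ch ≠ d := fun he => hc1 (he ▸ hd)
    simp [lumosFirstIdx, this]
  have hmap2 : l2.map (fun c => lumosFirstIdx (ch :: rest) i c)
      = l2.map (fun c => lumosFirstIdx rest (i + 1) c) := by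
    apply List.map_congr_left
    intro d hd
    have : PySem.Chars.upperChar ch ≠ d := fun he => hc2 (he ▸ hd)
    simp [lumosFirstIdx, this]
  have hself : lumosFirstIdx (ch :: rest) i (PySem.Chars.upperChar ch) = some i := by
    simp [lumosFirstIdx]
  simp only [List.map_append, List.map_cons, hmap1, hmap2, hself]
  set g := fun c => lumosFirstIdx rest (i + 1) c with hg
  by_cases hnone : none ∈ l1.map g ++ l2.map g
  · have h1 : ((l1.map g ++ some i :: l2.map g).contains none) = true := by
      rcases List.mem_append.mp hnone with h | h
      · simp [List.contains_eq_mem, List.mem_append, h]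
      · simp [List.contains_eq_mem, List.mem_append, h]
    have h2 : ((l1.map g ++ l2.map g).contains none) = true := by
      simp [List.contains_eq_mem, hnone]
    rw [h1, h2]
    simp
  · have h1 : ((l1.map g ++ some i :: l2.map g).contains none) = false := by
      simp only [List.contains_eq_mem, List.mem_append, List.mem_cons] at *
      simp only [not_or] at hnone
      simp [hnone.1, hnone.2]
    have h2 : ((l1.map g ++ l2.map g).contains none) = false := by
      simp [List.contains_eq_mem, hnone]
    rw [h1, h2]
    simp only [Bool.false_eq_true, if_false]
    -- all found indices in rest are ≥ i+1
    have hge : ∀ v ∈ (l1.map g ++ l2.map g).filterMap id, i + 1 ≤ v := by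
      intro v hv
      rcases List.mem_filterMap.mp hv with ⟨a, ha, hav⟩
      subst hav
      rcases List.mem_append.mp ha with h | h <;>
      · rcases List.mem_map.mp h with ⟨d, _, hd⟩
        simp only [hg] at hd
        exact lumosFirstIdx_ge rest (i + 1) d v hd
    -- the filterMap on the right is nonempty
    have hfm : (l1.map g ++ l2.map g).filterMap id ≠ [] := by
      intro hz
      have hall := List.filterMap_eq_nil_iff.mp hz
      rcases List.exists_mem_of_ne_nil _ hne with ⟨d, hd⟩
      have hmem : g d ∈ l1.map g ++ l2.map g := by
        rcases List.mem_append.mp hd with h | h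
        · exact List.mem_append.mpr (Or.inl (List.mem_map_of_mem h))
        · exact List.mem_append.mpr (Or.inr (List.mem_map_of_mem h))
      have hgd := hall (g d) hmem
      simp only [id] at hgd
      rw [hgd] at hmem
      exact hnone hmem
    obtain ⟨m, hm⟩ : ∃ m, PySem.List.max? ((l1.map g ++ l2.map g).filterMap id) (fun x => x) = some m := by
      cases hx : PySem.List.max? ((l1.map g ++ l2.map g).filterMap id) (fun x => x) with
      | none => exact absurd ((PySem.List.max?_eq_none_iff _ _).mp hx) hfm
      | some m => exact ⟨m, rfl⟩
    have hmmem := PySem.List.max?_mem hm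
    have hmge : i + 1 ≤ m := hge m hmmem
    have hleft : PySem.List.max? ((l1.map g ++ some i :: l2.map g).filterMap id) (fun x => x) = some m := by
      apply lumos_max_char
      · simp only [List.filterMap_append, List.filterMap_cons, id] at hmmem ⊢
        rcases List.mem_append.mp hmmem with h | h
        · exact List.mem_append.mpr (Or.inl h)
        · exact List.mem_append.mpr (Or.inr (List.mem_cons_of_mem _ h))
      · intro x hx
        simp only [List.filterMap_append, List.filterMap_cons, id] at hx
        rcases List.mem_append.mp hx with h | h
        · exact PySem.List.max?_isMax hm x (by
            simp only [List.filterMap_append] at hmmem ⊢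
            exact List.mem_append.mpr (Or.inl h))
        · rcases List.mem_cons.mp h with h | h
          · subst h; omega
          · exact PySem.List.max?_isMax hm x (by
              simp only [List.filterMap_append] at hmmem ⊢
              exact List.mem_append.mpr (Or.inr h))
    rw [hleft, hm]

-- core invariant: A's scan from state `seen` equals B's staged-scan answer over the missing letters
theorem lumos_inv (cs : List Char) (i : Int) (seen : PySem.Set Char)
    (hnd : seen.Nodup) (hsub : ∀ k ∈ seen, k ∈ lumosNeededB) (hlen : seen.length < 5) :
    lumosLoopA cs i seen
      = lumosAltCore (lumosNeededB.filter (fun d => !(PySem.Set.contains seen d))) cs i := by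
  induction cs generalizing i seen with
  | nil =>
    simp only [lumosLoopA, lumosAltCore]
    rcases List.exists_mem_of_ne_nil _ (lumos_missing_ne_nil seen hlen) with ⟨d, hd⟩
    have : ((lumosNeededB.filter (fun d => !(PySem.Set.contains seen d))).map
        (fun c => lumosFirstIdx [] i c)).contains none = true := by
      simp only [List.contains_eq_mem, List.mem_map]
      exact decide_eq_true ⟨d, hd, rfl⟩
    rw [this]
    simp
  | cons ch rest ih =>
    simp only [lumosLoopA]
    set c := PySem.Chars.upperChar ch with hc_def
    by_cases hc : c ∈ lumosNeededB
    · have hcA : PySem.Set.contains lumosNeeded c = true := by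
        have he : lumosNeeded = lumosNeededB := by decide
        rw [he]; simpa [PySem.Set.contains, List.contains_eq_mem] using hc
      rw [if_pos hcA]
      by_cases hs : c ∈ seen
      · -- already seen: set unchanged, both sides step over ch
        have hadd : PySem.Set.add seen c = seen := by
          simp [PySem.Set.add, PySem.Set.contains, List.contains_eq_mem, hs]
        have hlen5 : PySem.Set.len lumosNeeded = 5 := by decide
        have hne5 : PySem.Set.len (PySem.Set.add seen c) ≠ PySem.Set.len lumosNeeded := by
          rw [hadd, hlen5]; simp only [PySem.Set.len]; omega
        rw [if_neg hne5, hadd]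
        rw [ih (i + 1) seen hnd hsub hlen]
        exact (lumos_altCore_skip _ ch rest i (by
          intro hm
          have h2 := List.mem_filter.mp hm
          simp only [PySem.Set.contains, List.contains_eq_mem, Bool.not_eq_eq_eq_not,
            Bool.not_true, decide_eq_false_iff_not] at h2
          exact h2.2 hs)).symm
      · -- new needed letter
        have hadd : PySem.Set.add seen c = seen ++ [c] := by
          simp [PySem.Set.add, PySem.Set.contains, List.contains_eq_mem, hs]
        have hlen5 : PySem.Set.len lumosNeeded = 5 := by decide
        have hcm : c ∈ lumosNeededB.filter (fun d => !(PySem.Set.contains seen d)) := by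
          apply List.mem_filter.mpr
          exact ⟨hc, by simp [PySem.Set.contains, List.contains_eq_mem, hs]⟩
        have hmnd : (lumosNeededB.filter (fun d => !(PySem.Set.contains seen d))).Nodup :=
          List.Nodup.filter _ (by decide)
        by_cases hfull : seen.length + 1 = 5
        · -- fifth letter: A returns i+1; missing = [c]
          have heq : PySem.Set.len (PySem.Set.add seen c) = PySem.Set.len lumosNeeded := by
            rw [hadd, hlen5]; simp only [PySem.Set.len, List.length_append]; simp; omega
          rw [if_pos heq]
          -- seen ++ [c] covers all needed letters
          have hnd' : (seen ++ [c]).Nodup := by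
            rw [List.nodup_append]
            exact ⟨hnd, List.nodup_singleton _, by
              intro a ha b hb heq2
              rw [List.mem_singleton.mp hb] at heq2
              exact hs (heq2 ▸ ha)⟩
          have hsub' : (seen ++ [c]) ⊆ lumosNeededB := by
            intro k hk
            rcases List.mem_append.mp hk with hk | hk
            · exact hsub k hk
            · simp at hk; rw [hk]; exact hc
          have hlenle : lumosNeededB.length ≤ (seen ++ [c]).length := by
            simp [lumosNeededB]; omega
          have hsup : lumosNeededB ⊆ (seen ++ [c]) := by
            have hsp := List.subperm_of_subset hnd' hsub'
            have hperm := hsp.perm_of_length_le hlenle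
            exact fun x hx => (hperm.mem_iff).2 hx
          have hmiss : lumosNeededB.filter (fun d => !(PySem.Set.contains seen d)) = [c] := by
            apply lumos_eq_singleton _ _ hmnd _ hcm
            intro x hx
            have hxf := List.mem_filter.mp hx
            rcases List.mem_append.mp (hsup hxf.1) with h | h
            · exfalso
              have := hxf.2
              simp [PySem.Set.contains, List.contains_eq_mem, h] at this
            · simpa using h
          rw [hmiss]
          unfold lumosAltCore
          have hself : lumosFirstIdx (ch :: rest) i c = some i := by
            simp [lumosFirstIdx, hc_def]
          simp only [List.map_cons, List.map_nil, hself]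
          rw [show (([some i] : List (Option Int)).contains none) = false by simp]
          simp only [Bool.false_eq_true, if_false, List.filterMap_cons, List.filterMap_nil, id]
          rw [lumos_max_char [i] i (by simp) (by intro x hx; simp at hx; omega)]
          rfl
        · -- still incomplete
          have hne5 : PySem.Set.len (PySem.Set.add seen c) ≠ PySem.Set.len lumosNeeded := by
            rw [hadd, hlen5]; simp only [PySem.Set.len, List.length_append]; simp; omega
          rw [if_neg hne5, hadd]
          have hnd' : (seen ++ [c]).Nodup := by
            rw [List.nodup_append]
            exact ⟨hnd, List.nodup_singleton _, by
              intro a ha b hb heq2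
              rw [List.mem_singleton.mp hb] at heq2
              exact hs (heq2 ▸ ha)⟩
          have hsub' : ∀ k ∈ seen ++ [c], k ∈ lumosNeededB := by
            intro k hk
            rcases List.mem_append.mp hk with hk | hk
            · exact hsub k hk
            · simp at hk; rw [hk]; exact hc
          have hlt' : (seen ++ [c]).length < 5 := by simp; omega
          rw [ih (i + 1) (seen ++ [c]) hnd' hsub' hlt']
          -- missing(seen') = missing(seen) with c removed
          have hfilter : lumosNeededB.filter (fun d => !(PySem.Set.contains (seen ++ [c]) d))
              = (lumosNeededB.filter (fun d => !(PySem.Set.contains seen d))).filter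
                  (fun d => !(d == c)) := by
            rw [List.filter_filter]
            apply List.filter_congr
            intro d _
            by_cases hdc : d = c <;> by_cases hds : d ∈ seen <;>
              simp [PySem.Set.contains, List.contains_eq_mem, List.mem_append, hdc, hds]
          obtain ⟨l1, l2, hdec⟩ := List.append_of_mem hcm
          have hnd2 : (l1 ++ c :: l2).Nodup := hdec ▸ hmnd
          have hc1 : c ∉ l1 := by
            intro h
            have := List.disjoint_of_nodup_append hnd2 -- l1 disjoint c::l2
            exact this h (by simp)
          have hc2 : c ∉ l2 := by
            have := (List.nodup_append.mp hnd2).2.1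
            rw [List.nodup_cons] at this
            exact this.1
          have hl12 : (lumosNeededB.filter (fun d => !(PySem.Set.contains seen d))).filter
              (fun d => !(d == c)) = l1 ++ l2 := by
            rw [hdec, List.filter_append, List.filter_cons]
            have : (!(c == c)) = false := by simp
            rw [this]
            simp only [Bool.false_eq_true, if_false]
            rw [List.filter_eq_self.mpr (fun a ha => by
                  simp only [Bool.not_eq_eq_eq_not, Bool.not_true]
                  exact decide_eq_false (fun he => hc1 (he ▸ ha))),
                List.filter_eq_self.mpr (fun a ha => by
                  simp only [Bool.not_eq_eq_eq_not, Bool.not_true]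
                  exact decide_eq_false (fun he => hc2 (he ▸ ha)))]
          have hne : l1 ++ l2 ≠ [] := by
            intro h
            have := lumos_missing_ne_nil (seen ++ [c]) hlt'
            rw [hfilter, hl12] at this
            exact this h
          rw [hfilter, hl12, hdec]
          exact (lumos_altCore_hit l1 l2 ch rest i hc1 hc2 hne).symm
    · -- not a needed letter: both sides skip
      have hcA : ¬ PySem.Set.contains lumosNeeded c = true := by
        have he : lumosNeeded = lumosNeededB := by decide
        rw [he]; simpa [PySem.Set.contains, List.contains_eq_mem] using hc
      rw [if_neg hcA]
      rw [ih (i + 1) seen hnd hsub hlen]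
      exact (lumos_altCore_skip _ ch rest i (fun hm => hc (List.mem_filter.mp hm).1)).symm

-- ===== VERDICT (by name: the statement is the Claim_ definition above) =====
theorem earliest_lumos_step_spec : Claim_equal_earliest_lumos_step := by
  intro runes _
  unfold Spec_earliest_lumos_step earliest_lumos_step
  have h := lumos_inv runes.toList 0 PySem.Set.empty (by simp [PySem.Set.empty])
    (by simp [PySem.Set.empty]) (by simp [PySem.Set.empty])
  have hfilt : lumosNeededB.filter (fun d => !(PySem.Set.contains PySem.Set.empty d))
      = lumosNeededB := by
    simp [PySem.Set.contains, PySem.Set.empty]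
  rw [hfilt] at h
  rw [h]
  rfl
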